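-- pv_equiv track=rewrite | github.com/talavis/euler | python/p120.py | find_rmax
-- ===== SOURCE A (Python) =====
-- def find_rmax(a):
--     n = 1
--     div = a**2
--     r = 2
--     remains = []
--     while r not in remains:
--         remains.append(r)
--         num = (a-1)**n + (a+1)**n
--         r = num % div
--         # n % 2 ? 0 will always give remainder 2
--         n += 2
--     return max(remains)
-- ===== SOURCE B (Python) =====
-- def find_rmax(a):
--     # (a-1)**n + (a+1)**n is congruent to 2*n*a mod a**2 for odd n (binomial
--     # expansion), so the remainders are the arithmetic progression 2*a*n mod a**2
--     # over odd n; its largest value is 2*|a|*((|a|-1)//2), and 2 (the seed value)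
--     # is always in the list as well.
--     b = abs(a)
--     return max(2, 2 * b * ((b - 1) // 2))
-- ===== Notes on version B (the rewrite author's own statement) =====
-- stated objective: faster
-- what changed: Replaces the cycle-detecting loop over huge powers (a-1)^n+(a+1)^n mod a^2 by the closed form max(2, 2*|a|*((|a|-1)//2)) derived from the binomial expansion.
-- outside the precondition, e.g. on find_rmax(0): A raises ZeroDivisionError, B returns 2
import Mathlib
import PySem

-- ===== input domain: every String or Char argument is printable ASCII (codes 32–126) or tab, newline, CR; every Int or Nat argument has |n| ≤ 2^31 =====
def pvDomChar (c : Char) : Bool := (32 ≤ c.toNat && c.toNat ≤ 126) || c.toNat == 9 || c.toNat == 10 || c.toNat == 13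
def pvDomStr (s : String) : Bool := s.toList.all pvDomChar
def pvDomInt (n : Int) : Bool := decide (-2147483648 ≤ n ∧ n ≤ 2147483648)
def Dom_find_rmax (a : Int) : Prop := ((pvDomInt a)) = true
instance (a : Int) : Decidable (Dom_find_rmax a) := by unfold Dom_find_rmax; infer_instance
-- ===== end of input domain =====

-- B replaces A's cycle-detecting loop over the powers (a-1)^n+(a+1)^n mod a^2 by the
-- closed form max(2, 2*|a|*((|a|-1)//2)) from the binomial expansion (objective: faster).

-- ===== PORT A =====
-- the while loop, fuel only for totality (fuel is proven sufficient for a ≠ 0; exact transliteration otherwise)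
def findLoop (a div : Int) (fuel n : Nat) (r : Int) (remains : List Int) : List Int :=
  match fuel with
  | 0 => remains
  | fuel+1 =>
    if r ∈ remains then remains
    else findLoop a div fuel (n+2) (PySem.Int.mod ((a-1)^n + (a+1)^n) div) (remains ++ [r])

def find_rmax (a : Int) : Int :=
  -- n = 1; div = a**2; r = 2; remains = []; while …; return max(remains)
  -- remains is never empty (it always receives 2), so Python's max is max? ... |>.getD 0
  ((PySem.List.max? (findLoop a (a^2) ((a^2).toNat + 2) 1 2 []) (fun x => x)).getD 0)

-- ===== PORT B =====
def find_rmax_alt (a : Int) : Int :=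
  max 2 (2 * (a.natAbs : Int) * PySem.Int.floordiv ((a.natAbs : Int) - 1) 2)

-- ===== PRECONDITION & SPEC =====
-- Pre_ excludes only a = 0, on which A raises ZeroDivisionError (num % 0).
def Pre_find_rmax (a : Int) : Prop := a ≠ 0
instance (a : Int) : Decidable (Pre_find_rmax a) := by unfold Pre_find_rmax; infer_instance
def pvWitness_find_rmax : Int := 7

def Spec_find_rmax (a : Int) (out : Int) : Prop := out = find_rmax_alt a
instance (a : Int) (out : Int) : Decidable (Spec_find_rmax a out) := by unfold Spec_find_rmax; infer_instance

-- ===== CLAIM (what is proved, stated in full; the proofs are below) =====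
def Claim_equal_find_rmax : Prop := ∀ (a : Int), Dom_find_rmax a → Pre_find_rmax a → Spec_find_rmax a (find_rmax a)

-- ===== LEMMAS AND PROOFS =====

-- the k-th remainder produced by the loop (n = 2k+1): (a-1)^(2k+1)+(a+1)^(2k+1) ≡ 2a+4ak (mod a²)
def tA (a : Int) (k : Nat) : Int := (2*a + 4*a*k) % (a^2)
-- g = gcd(4a, a²); the loop's remainders form the full congruence class of 2a modulo g below a²
def gA (a : Int) : Nat := Int.gcd (4*a) (a^2)
-- the period of the remainder sequence
def PA (a : Int) : Nat := (a^2).toNat / gA a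
-- the largest remainder
def xstar (a : Int) : Int := a^2 - gA a + (2*a) % (gA a)

lemma m_pos (a : Int) (ha : a ≠ 0) : 0 < a^2 := by positivity

lemma g_pos (a : Int) (ha : a ≠ 0) : 0 < (gA a : Int) := by
  have : gA a ≠ 0 := by
    simp [gA, Int.gcd_eq_zero_iff]
    intro h; exact absurd h (by omega)
  omega

lemma g_dvd_s (a : Int) : (gA a : Int) ∣ 4*a := Int.gcd_dvd_left _ _
lemma g_dvd_m (a : Int) : (gA a : Int) ∣ a^2 := Int.gcd_dvd_right _ _

lemma m_toNat (a : Int) : ((a^2).toNat : Int) = a^2 := Int.toNat_of_nonneg (by positivity)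

lemma g_dvd_mN (a : Int) : gA a ∣ (a^2).toNat := by
  have h := g_dvd_m a
  rw [← m_toNat a] at h
  exact_mod_cast h

lemma gmulP (a : Int) (ha : a ≠ 0) : (gA a : Int) * (PA a : Int) = a^2 := by
  have h : gA a * PA a = (a^2).toNat := Nat.mul_div_cancel' (g_dvd_mN a)
  rw [← m_toNat a]; exact_mod_cast h

lemma P_pos (a : Int) (ha : a ≠ 0) : 0 < PA a := by
  apply Nat.div_pos
  · exact Nat.le_of_dvd (by have := m_pos a ha; omega) (g_dvd_mN a)
  · have := g_pos a ha; omega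

lemma m_dvd_sP (a : Int) (ha : a ≠ 0) : (a^2) ∣ 4*a*(PA a : Int) := by
  obtain ⟨c, hc⟩ := g_dvd_s a
  exact ⟨c, by rw [← gmulP a ha]; rw [hc]; ring⟩

-- binomial: (1+c)^n ≡ 1 + n c (mod c²)
lemma pow_one_add_modeq (c : Int) (n : Nat) : (1 + c)^n ≡ 1 + n*c [ZMOD c^2] := by
  induction n with
  | zero => simp
  | succ n ih =>
    have h1 : (1 + c)^(n+1) = (1 + c)^n * (1 + c) := by ring
    have h2 : (1 + (n:Int)*c) * (1 + c) ≡ 1 + ((n+1:Nat):Int)*c [ZMOD c^2] := by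
      have hd : (c^2 : Int) ∣ (1 + ((n+1:Nat):Int)*c) - (1 + (n:Int)*c) * (1 + c) := ⟨-n, by push_cast; ring⟩
      exact (Int.modEq_iff_dvd.mpr hd)
    rw [h1]
    exact (ih.mul_right (1 + c)).trans h2

lemma S_modeq (a : Int) (k : Nat) :
    ((a-1)^(2*k+1) + (a+1)^(2*k+1)) % (a^2) = tA a k := by
  have h1 : (a+1)^(2*k+1) ≡ 1 + ((2*k+1 : Nat):Int)*a [ZMOD a^2] := by
    have := pow_one_add_modeq a (2*k+1)
    rwa [add_comm 1 a] at this
  have h2 : (1 - a)^(2*k+1) ≡ 1 + ((2*k+1 : Nat):Int)*(-a) [ZMOD a^2] := by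
    have := pow_one_add_modeq (-a) (2*k+1)
    rwa [show 1 + -a = 1 - a by ring, show (-a)^2 = a^2 by ring] at this
  have h3 : (a-1)^(2*k+1) = -((1 - a)^(2*k+1)) := by
    rw [show a - 1 = -(1-a) by ring, Odd.neg_pow ⟨k, by ring⟩]
  have h4 : (a-1)^(2*k+1) + (a+1)^(2*k+1) ≡ 2*a + 4*a*k [ZMOD a^2] := by
    have := (h2.neg).add h1
    rw [← h3] at this
    refine this.trans (Int.modEq_iff_dvd.mpr ⟨0, by push_cast; ring⟩)
  exact h4

lemma t_period (a : Int) (ha : a ≠ 0) : tA a (PA a) = tA a 0 := by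
  obtain ⟨c, hc⟩ := m_dvd_sP a ha
  unfold tA
  rw [show 2*a + 4*a*((PA a : Nat) : Int) = 2*a + 4*a*(0:Nat) + (a^2)*c by push_cast; rw [← hc]; ring,
    Int.add_mul_emod_self_left]

lemma t_inj (a : Int) (ha : a ≠ 0) (i j : Nat) (hij : i < j) (hj : j < PA a) :
    tA a i ≠ tA a j := by
  intro h
  have hmod : (2*a + 4*a*(i:Int)) ≡ (2*a + 4*a*(j:Int)) [ZMOD a^2] := h
  have hdvd : (a^2) ∣ 4*a*((j:Int) - i) := by
    have := Int.ModEq.dvd hmod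
    refine dvd_trans (dvd_refl _) ?_
    convert this using 1; ring
  -- divide out g
  have hg0 : (gA a : Int) ≠ 0 := by have := g_pos a ha; omega
  obtain ⟨c4, hc4⟩ := g_dvd_s a
  have hm : a^2 = (gA a : Int) * (PA a : Int) := (gmulP a ha).symm
  have hP_dvd : ((PA a : Nat) : Int) ∣ c4 * ((j:Int) - i) := by
    have h2 : (gA a : Int) * (PA a : Int) ∣ (gA a : Int) * (c4 * ((j:Int) - i)) := by
      rw [← hm]
      convert hdvd using 1
      rw [hc4]; ring
    exact (mul_dvd_mul_iff_left hg0).mp h2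
  have hcop : IsCoprime ((PA a : Nat) : Int) c4 := by
    rw [Int.isCoprime_iff_gcd_eq_one]
    have hgpos : 0 < Int.gcd (4*a) (a^2) := by have := g_pos a ha; simpa [gA] using this
    have := Int.gcd_div_gcd_div_gcd (i := 4*a) (j := a^2) hgpos
    have hc4' : c4 = 4*a / (gA a : Int) := by
      rw [hc4]; rw [Int.mul_ediv_cancel_left _ hg0]
    have hP' : ((PA a : Nat) : Int) = a^2 / (gA a : Int) := by
      rw [hm, Int.mul_ediv_cancel_left _ hg0]
    rw [hc4', hP']
    rw [Int.gcd_comm]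
    exact this
  have hP_dvd_d : ((PA a : Nat) : Int) ∣ ((j:Int) - i) :=
    hcop.dvd_of_dvd_mul_left (mul_comm c4 ((j:Int) - i) ▸ hP_dvd)
  have : ((PA a : Nat) : Int) ≤ (j:Int) - i := Int.le_of_dvd (by omega) hP_dvd_d
  omega

lemma a_dvd_t (a : Int) (k : Nat) : a ∣ tA a k := by
  unfold tA
  rw [Int.emod_def]
  exact dvd_sub ⟨2 + 4*k, by ring⟩ ⟨a * ((2*a + 4*a*k) / a^2), by ring⟩

lemma t_ne_two (a : Int) (ha : a ≠ 0) (k : Nat) : tA a k ≠ 2 := by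
  intro h
  have h2 : a ∣ 2 := h ▸ a_dvd_t a k
  have hb : a.natAbs ∣ 2 := by
    have := Int.natAbs_dvd_natAbs.mpr h2; simpa using this
  have hb2 : a.natAbs = 1 ∨ a.natAbs = 2 := (Nat.dvd_prime Nat.prime_two).mp hb
  rcases Int.natAbs_eq a with he | he <;> rcases hb2 with h1 | h1 <;>
    rw [he, h1] at h <;> simp [tA] at h <;> omega

lemma t_le (a : Int) (ha : a ≠ 0) (k : Nat) : tA a k ≤ xstar a := by
  have hm := m_pos a ha
  have hg := g_pos a ha
  have hg0 : (gA a : Int) ≠ 0 := by omega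
  obtain ⟨mq, hmq⟩ := g_dvd_m a
  obtain ⟨sq, hsq⟩ := g_dvd_s a
  have ht0 : 0 ≤ tA a k := Int.emod_nonneg _ (by omega)
  have ht1 : tA a k < a^2 := Int.emod_lt_of_pos _ hm
  have hr0 : 0 ≤ (2*a) % (gA a : Int) := Int.emod_nonneg _ hg0
  have hr1 : (2*a) % (gA a : Int) < (gA a : Int) := Int.emod_lt_of_pos _ hg
  have hdvd : (gA a : Int) ∣ xstar a - tA a k := by
    refine ⟨mq - 1 - (2*a)/(gA a : Int) - sq*k + mq*((2*a + 4*a*k) / a^2), ?_⟩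
    unfold xstar tA
    rw [Int.emod_def (2*a + 4*a*(k:Int)) (a^2), Int.emod_def (2*a) (gA a : Int)]
    calc a^2 - (gA a : Int) + (2*a - (gA a : Int) * (2*a/(gA a : Int)))
          - (2*a + 4*a*(k:Int) - a^2 * ((2*a + 4*a*(k:Int)) / a^2))
        = a^2 - (gA a : Int) - (gA a : Int) * (2*a/(gA a : Int))
          - (4*a)*(k:Int) + a^2 * ((2*a + 4*a*(k:Int)) / a^2) := by ring
      _ = _ := by rw [hmq, hsq]; ring
  obtain ⟨c, hc⟩ := hdvd
  by_contra hlt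
  push Not at hlt
  have hcneg : c ≤ -1 := by nlinarith
  have : (gA a : Int) * c ≤ (gA a : Int) * (-1) := by
    exact mul_le_mul_of_nonneg_left hcneg (by omega)
  have hxs : xstar a = a^2 - (gA a : Int) + (2*a) % (gA a : Int) := rfl
  omega

lemma t_attain (a : Int) (ha : a ≠ 0) : ∃ k, k < PA a ∧ tA a k = xstar a := by
  have hm := m_pos a ha
  have hg := g_pos a ha
  have hg0 : (gA a : Int) ≠ 0 := by omega
  have hP := P_pos a ha
  have hPi : (0:Int) < (PA a : Int) := by exact_mod_cast hP
  have hr0 : 0 ≤ (2*a) % (gA a : Int) := Int.emod_nonneg _ hg0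
  have hr1 : (2*a) % (gA a : Int) < (gA a : Int) := Int.emod_lt_of_pos _ hg
  have hgm : (gA a : Int) ≤ a^2 := Int.le_of_dvd hm (g_dvd_m a)
  have hxs0 : 0 ≤ xstar a := by unfold xstar; omega
  have hxs1 : xstar a < a^2 := by unfold xstar; omega
  -- Bezout
  set u := Int.gcdA (4*a) (a^2) with hu
  set v := Int.gcdB (4*a) (a^2) with hv
  have hbez : (gA a : Int) = 4*a*u + (a^2)*v := Int.gcd_eq_gcd_ab (4*a) (a^2)
  -- xstar - 2a = g * w
  set w : Int := (PA a : Int) - 1 - (2*a)/(gA a : Int) with hw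
  have hxw : xstar a = 2*a + (gA a : Int) * w := by
    have h1 : (2*a) % (gA a : Int) = 2*a - (gA a : Int) * ((2*a)/(gA a : Int)) := Int.emod_def _ _
    have h2 : (gA a : Int) * (PA a : Int) = a^2 := gmulP a ha
    unfold xstar
    rw [h1, hw, ← h2]; ring
  set k0 : Int := u*w with hk0
  have key : (2*a + 4*a*k0) % (a^2) = xstar a := by
    have h1 : 2*a + 4*a*k0 = xstar a + (a^2) * (-(v*w)) := by
      rw [hxw, hbez]; ring
    rw [h1, Int.add_mul_emod_self_left]
    exact Int.emod_eq_of_lt hxs0 hxs1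
  -- shift k0 into [0, PA)
  set k : Nat := (k0 % (PA a : Int)).toNat with hk
  have hknn : 0 ≤ k0 % (PA a : Int) := Int.emod_nonneg _ (by omega)
  have hkc : (k : Int) = k0 % (PA a : Int) := Int.toNat_of_nonneg hknn
  have hklt : k < PA a := by
    have := Int.emod_lt_of_pos k0 hPi
    omega
  refine ⟨k, hklt, ?_⟩
  obtain ⟨c, hc⟩ := m_dvd_sP a ha
  have h2 : 2*a + 4*a*(k:Int) = (2*a + 4*a*k0) + (a^2) * (-(c*(k0/(PA a : Int)))) := by
    rw [hkc, Int.emod_def k0 (PA a : Int)]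
    calc 2*a + 4*a*(k0 - (PA a : Int)*(k0/(PA a : Int)))
        = (2*a + 4*a*k0) - (4*a*(PA a : Int))*(k0/(PA a : Int)) := by ring
      _ = _ := by rw [hc]; ring
  unfold tA
  rw [h2, Int.add_mul_emod_self_left, key]

lemma mod_eq_t (a : Int) (ha : a ≠ 0) (k : Nat) :
    PySem.Int.mod ((a-1)^(2*k+1) + (a+1)^(2*k+1)) (a^2) = tA a k := by
  rw [PySem.Int.mod_eq_emod_of_pos (m_pos a ha)]
  exact S_modeq a k

lemma loop_inv (a : Int) (ha : a ≠ 0) (fuel : Nat) : ∀ (j : Nat), j ≤ PA a → PA a - j < fuel →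
    findLoop a (a^2) fuel (2*j+3) (tA a j) (2 :: (List.range j).map (tA a))
      = 2 :: (List.range (PA a)).map (tA a) := by
  induction fuel with
  | zero => intro j _ hf; omega
  | succ fuel ih =>
    intro j hj hf
    rw [findLoop]
    by_cases hjP : j = PA a
    · subst hjP
      have hmem : tA a (PA a) ∈ 2 :: (List.range (PA a)).map (tA a) := by
        rw [t_period a ha]
        exact List.mem_cons_of_mem _ (List.mem_map_of_mem (List.mem_range.mpr (P_pos a ha)))
      rw [if_pos hmem]
    · have hjlt : j < PA a := by omega
      have hnmem : tA a j ∉ 2 :: (List.range j).map (tA a) := by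
        intro hmem
        rcases List.mem_cons.mp hmem with h2 | hmap
        · exact t_ne_two a ha j h2
        · obtain ⟨i, hi, hti⟩ := List.mem_map.mp hmap
          exact t_inj a ha i j (List.mem_range.mp hi) hjlt hti
      rw [if_neg hnmem]
      have hnum : PySem.Int.mod ((a-1)^(2*j+3) + (a+1)^(2*j+3)) (a^2) = tA a (j+1) := by
        have := mod_eq_t a ha (j+1)
        rwa [show 2*(j+1)+1 = 2*j+3 by omega] at this
      have hlist : (2 :: (List.range j).map (tA a)) ++ [tA a j]
          = 2 :: (List.range (j+1)).map (tA a) := by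
        simp [List.range_succ]
      have hn : 2*j+3+2 = 2*(j+1)+3 := by omega
      rw [hnum, hlist, hn]
      exact ih (j+1) (by omega) (by omega)

lemma find_rmax_eq_list (a : Int) (ha : a ≠ 0) :
    find_rmax a = ((PySem.List.max? (2 :: (List.range (PA a)).map (tA a)) (fun x => x)).getD 0) := by
  unfold find_rmax
  rw [show (a^2).toNat + 2 = ((a^2).toNat + 1) + 1 from rfl, findLoop]
  rw [if_neg (by simp)]
  have h1 : PySem.Int.mod ((a-1)^1 + (a+1)^1) (a^2) = tA a 0 := by
    have := mod_eq_t a ha 0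
    rwa [show 2*0+1 = 1 by omega] at this
  have hfuel : PA a - 0 < (a^2).toNat + 1 := by
    have : PA a ≤ (a^2).toNat := Nat.div_le_self _ _
    omega
  have hloop := loop_inv a ha ((a^2).toNat + 1) 0 (by omega) hfuel
  simp only [List.range_zero, List.map_nil] at hloop
  rw [h1, show ((([]:List Int)) ++ [(2:Int)]) = [2] from rfl,
    show (1+2 : Nat) = 2*0+3 from rfl, hloop]

lemma max_eval (a : Int) (ha : a ≠ 0) :
    ((PySem.List.max? (2 :: (List.range (PA a)).map (tA a)) (fun x => x)).getD 0) = max 2 (xstar a) := by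
  rcases hsome : PySem.List.max? (2 :: (List.range (PA a)).map (tA a)) (fun x => x) with _ | m
  · rw [PySem.List.max?_eq_none_iff] at hsome
    exact absurd hsome (by simp)
  · have hmem := PySem.List.max?_mem hsome
    have hmax := PySem.List.max?_isMax hsome
    have h2le : (2:Int) ≤ m := hmax 2 List.mem_cons_self
    obtain ⟨k, hk, htk⟩ := t_attain a ha
    have hxle : xstar a ≤ m := by
      have : tA a k ∈ 2 :: (List.range (PA a)).map (tA a) :=
        List.mem_cons_of_mem _ (List.mem_map_of_mem (List.mem_range.mpr hk))
      have := hmax _ this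
      simpa [htk] using this
    have hub : m ≤ max 2 (xstar a) := by
      rcases List.mem_cons.mp hmem with h | h
      · omega
      · obtain ⟨i, _, hi⟩ := List.mem_map.mp h
        have := t_le a ha i
        rw [hi] at this
        omega
    simp only [Option.getD_some]
    omega

lemma gA_eq (a : Int) : gA a = a.natAbs * Nat.gcd 4 a.natAbs := by
  unfold gA
  rw [Int.gcd, Int.natAbs_mul, Int.natAbs_pow]
  rw [show ((4:Int)).natAbs = 4 from rfl, sq]
  rw [Nat.gcd_mul_right]
  ring

lemma xstar_eq (a : Int) (ha : a ≠ 0) :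
    xstar a = 2 * (a.natAbs : Int) * (((a.natAbs : Int) - 1) / 2) := by
  have hb1 : 1 ≤ a.natAbs := by omega
  have hm : a^2 = ((a.natAbs : Int))^2 := by
    rw [← Int.abs_eq_natAbs, sq_abs]
  have hba : ((a.natAbs : Int)) ∣ a := Int.natAbs_dvd.mpr dvd_rfl
  rcases Nat.even_or_odd a.natAbs with he | ho
  case inr =>
    -- odd
    have hodd : a.natAbs % 2 = 1 := Nat.odd_iff.mp ho
    have hg4 : Nat.gcd 4 a.natAbs = 1 := by
      have hc : Nat.Coprime 2 a.natAbs := Nat.coprime_two_left.mpr ho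
      have := Nat.Coprime.pow_left 2 hc
      simpa using this
    have hg : (gA a : Int) = (a.natAbs : Int) := by
      rw [gA_eq, hg4, mul_one]
    have hmod : (2*a) % (gA a : Int) = 0 := by
      rw [hg]
      exact Int.emod_eq_zero_of_dvd (hba.mul_left 2)
    obtain ⟨c, hc⟩ : ∃ c, a.natAbs = 2*c + 1 := ⟨a.natAbs/2, by omega⟩
    have hbc : ((a.natAbs : Int)) = 2*(c:Int)+1 := by exact_mod_cast congrArg (Nat.cast : Nat → Int) hc
    have hdiv : (((a.natAbs : Int)) - 1)/2 = (c:Int) := by omega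
    unfold xstar
    rw [hmod, hg, hm, hdiv, hbc]
    ring
  case inl =>
    have hev : a.natAbs % 2 = 0 := Nat.even_iff.mp he
    obtain ⟨c, hc⟩ : ∃ c, a.natAbs = 2*c := ⟨a.natAbs/2, by omega⟩
    have hc1 : 1 ≤ c := by omega
    have hbc : ((a.natAbs : Int)) = 2*(c:Int) := by exact_mod_cast congrArg (Nat.cast : Nat → Int) hc
    have hdiv : (((a.natAbs : Int)) - 1)/2 = (c:Int) - 1 := by omega
    have hgoal2 : (2:Int) * (a.natAbs : Int) * ((c:Int)-1) = ((a.natAbs:Int))^2 - 2*(a.natAbs:Int) := by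
      rw [hbc]; ring
    by_cases h4 : a.natAbs % 4 = 0
    · -- b ≡ 0 mod 4
      have hg4 : Nat.gcd 4 a.natAbs = 4 := Nat.gcd_eq_left (by omega)
      have hg : (gA a : Int) = (a.natAbs : Int) * 4 := by
        rw [gA_eq, hg4]; push_cast; ring
      have hmod : (2*a) % (gA a : Int) = 2*(a.natAbs : Int) := by
        rw [hg]
        have hor : 2*a = 2*(a.natAbs:Int) ∨ 2*a = 2*(a.natAbs:Int) + ((a.natAbs:Int)*4)*(-1) := by
          omega
        rcases hor with hae | hae
        · rw [hae]
          exact Int.emod_eq_of_lt (by omega) (by omega)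
        · rw [hae, Int.add_mul_emod_self_left]
          exact Int.emod_eq_of_lt (by omega) (by omega)
      unfold xstar
      rw [hmod, hg, hm, hdiv, hgoal2]
      ring
    · -- b ≡ 2 mod 4
      have hc2 : c % 2 = 1 := by omega
      have hg4 : Nat.gcd 4 a.natAbs = 2 := by
        rw [hc, show (4:Nat) = 2*2 from rfl, Nat.gcd_mul_left]
        have : Nat.Coprime 2 c := Nat.coprime_two_left.mpr (Nat.odd_iff.mpr hc2)
        rw [this]
      have hg : (gA a : Int) = (a.natAbs : Int) * 2 := by
        rw [gA_eq, hg4]; push_cast; ring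
      have hmod : (2*a) % (gA a : Int) = 0 := by
        rw [hg]
        apply Int.emod_eq_zero_of_dvd
        have hor : 2*a = ((a.natAbs:Int)*2)*1 ∨ 2*a = ((a.natAbs:Int)*2)*(-1) := by omega
        rcases hor with hae | hae
        · exact ⟨1, hae⟩
        · exact ⟨-1, hae⟩
      unfold xstar
      rw [hmod, hg, hm, hdiv, hgoal2]
      ring


-- ===== VERDICT (by name: the statement is the Claim_ definition above) =====
theorem find_rmax_spec : Claim_equal_find_rmax := by
  intro a _ ha
  unfold Spec_find_rmax find_rmax_alt
  rw [find_rmax_eq_list a ha, max_eval a ha, xstar_eq a ha,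
    PySem.Int.floordiv_eq_ediv_of_pos (show (0:Int) < 2 by norm_num)]
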